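-- pv_equiv track=rewrite | github.com/notionparallax/code1161base | week3/exercise1.py | gene_krupa_range
-- ===== SOURCE A (Python) =====
-- def gene_krupa_range(start, stop, even_step, odd_step):
--     """Make a range that has two step sizes.
--
--     make a list that instead of having evenly spaced steps
--     has odd steps be one size and even steps be another.
--     """
--     step_list = []
--     latest = start
--     index = 0
--     while latest < stop:
--         step_list.append(latest)
--         if index % 2 == 0:
--             latest = latest + even_step
--         else:
--             latest = latest + odd_step
--         index = index + 1
--     return step_list
-- ===== SOURCE B (Python) =====
-- def gene_krupa_range(start, stop, even_step, odd_step):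
--     """Closed-form: count the emitted elements with two ceiling divisions and
--     emit element j directly as start + (j//2)*(even_step+odd_step) + (j%2)*even_step."""
--     if start >= stop:
--         return []
--     s = even_step + odd_step
--     if s <= 0:
--         # past the first element the positions never advance toward stop;
--         # only the first element can be emitted
--         return [start]
--     n_even = -((start - stop) // s)             # ceil((stop-start)/s)
--     n_odd = -((start + even_step - stop) // s)  # ceil((stop-start-even_step)/s)
--     length = min(2 * n_even, 2 * max(n_odd, 0) + 1)
--     return [start + (j // 2) * s + (j % 2) * even_step for j in range(length)]
-- ===== Notes on version B (the rewrite author's own statement) =====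
-- stated objective: alternative
-- what changed: Replaced A's step-by-step simulation loop with a closed-form construction: two ceiling divisions compute the output length and each element j is emitted directly as start + (j//2)*(even_step+odd_step) + (j%2)*even_step.
import Mathlib
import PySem

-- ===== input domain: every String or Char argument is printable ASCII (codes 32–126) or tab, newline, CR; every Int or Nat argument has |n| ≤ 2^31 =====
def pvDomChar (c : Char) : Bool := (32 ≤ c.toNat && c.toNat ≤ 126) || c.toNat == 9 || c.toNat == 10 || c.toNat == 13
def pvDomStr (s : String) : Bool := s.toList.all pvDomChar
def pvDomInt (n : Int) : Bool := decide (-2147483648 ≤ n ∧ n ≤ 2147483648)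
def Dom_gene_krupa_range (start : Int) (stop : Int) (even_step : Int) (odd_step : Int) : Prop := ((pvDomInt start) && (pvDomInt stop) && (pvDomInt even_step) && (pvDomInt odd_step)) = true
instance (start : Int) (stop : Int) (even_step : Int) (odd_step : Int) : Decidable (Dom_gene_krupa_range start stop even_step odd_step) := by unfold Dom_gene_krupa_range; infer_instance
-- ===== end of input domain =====

-- B replaces A's step-by-step simulation loop by a closed form: two ceiling
-- divisions determine the output length, element j is start + (j//2)*(e+o) + (j%2)*e
-- (objective: alternative algorithm, same output cost).

-- ===== PORT A =====
-- A's while-loop: one element per iteration, step chosen by index parity.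
-- fuel bounds the iteration count; on every input admitted by Pre_ it is ample
-- (each pair of iterations advances latest by even_step+odd_step ≥ 1, or the loop
-- stops within two iterations), so the port computes exactly what A computes.
def gkrLoopA (fuel : Nat) (latest : Int) (stop : Int) (even_step : Int) (odd_step : Int) (index : Int) : List Int :=
  match fuel with
  | 0 => []
  | f + 1 =>
    if latest < stop then
      latest :: gkrLoopA f (if index % 2 = 0 then latest + even_step else latest + odd_step)
                  stop even_step odd_step (index + 1)
    else []

def gene_krupa_range (start : Int) (stop : Int) (even_step : Int) (odd_step : Int) : List Int :=
  gkrLoopA (2 * ((stop - start).toNat + 2)) start stop even_step odd_step 0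

-- ===== PORT B =====
-- B: closed-form construction, no simulation state (transliteration of Source B).
def gene_krupa_range_alt (start : Int) (stop : Int) (even_step : Int) (odd_step : Int) : List Int :=
  if stop ≤ start then []
  else
    let s := even_step + odd_step
    if s ≤ 0 then [start]
    else
      let nEven := -(PySem.Int.floordiv (start - stop) s)
      let nOdd := -(PySem.Int.floordiv (start + even_step - stop) s)
      let len := min (2 * nEven) (2 * max nOdd 0 + 1)
      (PySem.List.pyRange 0 len 1).map
        (fun j => start + PySem.Int.floordiv j 2 * s + PySem.Int.mod j 2 * even_step)

-- ===== PRECONDITION & SPEC =====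
-- Pre_ excludes exactly the inputs on which A's while-loop never terminates
-- (start < stop, the second position start+even_step also < stop, and the
-- per-pair advance even_step+odd_step not positive): A returns no value there.
def Pre_gene_krupa_range (start : Int) (stop : Int) (even_step : Int) (odd_step : Int) : Prop :=
  stop ≤ start ∨ stop ≤ start + even_step ∨ 0 < even_step + odd_step
instance (start : Int) (stop : Int) (even_step : Int) (odd_step : Int) : Decidable (Pre_gene_krupa_range start stop even_step odd_step) := by unfold Pre_gene_krupa_range; infer_instance

def pvWitness_gene_krupa_range : Int × Int × Int × Int := (0, 10, 3, 1)

def Spec_gene_krupa_range (start : Int) (stop : Int) (even_step : Int) (odd_step : Int) (out : List Int) : Prop := out = gene_krupa_range_alt start stop even_step odd_step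
instance (start : Int) (stop : Int) (even_step : Int) (odd_step : Int) (out : List Int) : Decidable (Spec_gene_krupa_range start stop even_step odd_step out) := by unfold Spec_gene_krupa_range; infer_instance

-- ===== CLAIM (what is proved, stated in full; the proofs are below) =====
def Claim_equal_gene_krupa_range : Prop := ∀ (start : Int) (stop : Int) (even_step : Int) (odd_step : Int), Dom_gene_krupa_range start stop even_step odd_step → Pre_gene_krupa_range start stop even_step odd_step → Spec_gene_krupa_range start stop even_step odd_step (gene_krupa_range start stop even_step odd_step)

-- ===== LEMMAS AND PROOFS =====

-- Proof-side helper: A's loop viewed two iterations at a time (the even/odd pair).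
def gkrPair (fuel : Nat) (latest : Int) (stop : Int) (even_step : Int) (odd_step : Int) : List Int :=
  match fuel with
  | 0 => []
  | f + 1 =>
    if latest < stop then
      let l2 := latest + even_step
      if l2 < stop then
        latest :: l2 :: gkrPair f (l2 + odd_step) stop even_step odd_step
      else [latest]
    else []

-- Two iterations of A's loop starting at an even index equal one pass of the pair loop.
theorem gkrA_eq_gkrPair (n : Nat) : ∀ (latest stop even_step odd_step : Int) (k : Int),
    gkrLoopA (2 * n) latest stop even_step odd_step (2 * k)
      = gkrPair n latest stop even_step odd_step := by
  induction n with
  | zero => intro latest stop e o k; rfl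
  | succ m ih =>
    intro latest stop e o k
    have hpar : (2 * k) % 2 = 0 := by omega
    have hpar2 : ¬ ((2 * k + 1) % 2 = 0) := by omega
    have hf : 2 * (m + 1) = 2 * m + 1 + 1 := by ring
    have hk : 2 * k + 1 + 1 = 2 * (k + 1) := by ring
    rw [hf]
    by_cases h : latest < stop
    · by_cases h2 : latest + e < stop
      · simp only [gkrLoopA, gkrPair, hpar, hpar2, if_pos h, if_pos h2, if_true, if_false, hk, ih]
      · simp [gkrLoopA, gkrPair, h, h2, hpar]
    · simp [gkrLoopA, gkrPair, h]

theorem fd_add_self (a b : Int) (hb : 0 < b) :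
    PySem.Int.floordiv (a + b) b = PySem.Int.floordiv a b + 1 := by
  have h := (PySem.Int.floordiv_eq_iff_of_pos (a := a) (b := b) hb).mp rfl
  refine (PySem.Int.floordiv_eq_iff_of_pos hb).mpr ?_
  constructor <;> nlinarith [h.1, h.2]

-- Base case: nothing to emit.
theorem alt_nil (start stop e o : Int) (h : stop ≤ start) :
    gene_krupa_range_alt start stop e o = [] := by
  simp [gene_krupa_range_alt, h]

-- Base case: only the first element fits (positive pair-step case).
theorem alt_single (start stop e o : Int) (h1 : start < stop) (h2 : stop ≤ start + e)
    (hs : 0 < e + o) :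
    gene_krupa_range_alt start stop e o = [start] := by
  have hns : ¬ (e + o ≤ 0) := by omega
  have hna : 1 ≤ -(PySem.Int.floordiv (start - stop) (e + o)) := by
    have := (PySem.Int.floordiv_lt_iff_lt_mul (a := start - stop) (q := 0) hs).mpr (by omega)
    omega
  have hnb : 0 ≤ PySem.Int.floordiv (start + e - stop) (e + o) := by
    have := (PySem.Int.le_floordiv_iff_mul_le (a := start + e - stop) (q := 0) hs).mpr (by omega)
    omega
  have hmax : max (-(PySem.Int.floordiv (start + e - stop) (e + o))) 0 = 0 := by omega
  have hlen : min (2 * -(PySem.Int.floordiv (start - stop) (e + o)))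
      (2 * max (-(PySem.Int.floordiv (start + e - stop) (e + o))) 0 + 1) = 1 := by omega
  simp only [gene_krupa_range_alt, if_neg (by omega : ¬ stop ≤ start), if_neg hns, hlen]
  rw [PySem.List.pyRange_one]
  norm_num [PySem.Int.floordiv, PySem.Int.mod]

-- Step case: with both first positions below stop, B's closed form satisfies the
-- same recurrence as the pair loop.
theorem alt_step (start stop e o : Int) (h1 : start < stop) (h2 : start + e < stop)
    (hs : 0 < e + o) :
    gene_krupa_range_alt start stop e o
      = start :: (start + e) :: gene_krupa_range_alt (start + (e + o)) stop e o := by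
  have hns : ¬ (e + o ≤ 0) := by omega
  set s := e + o with hsdef
  set na := -(PySem.Int.floordiv (start - stop) s) with hna_def
  set nb := -(PySem.Int.floordiv (start + e - stop) s) with hnb_def
  have hna1 : 1 ≤ na := by
    have := (PySem.Int.floordiv_lt_iff_lt_mul (a := start - stop) (q := 0) hs).mpr (by omega)
    omega
  have hnb1 : 1 ≤ nb := by
    have := (PySem.Int.floordiv_lt_iff_lt_mul (a := start + e - stop) (q := 0) hs).mpr (by omega)
    omega
  have hfa : PySem.Int.floordiv (start + s - stop) s = PySem.Int.floordiv (start - stop) s + 1 := by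
    rw [show start + s - stop = (start - stop) + s by ring, fd_add_self _ _ hs]
  have hfb : PySem.Int.floordiv (start + s + e - stop) s
      = PySem.Int.floordiv (start + e - stop) s + 1 := by
    rw [show start + s + e - stop = (start + e - stop) + s by ring, fd_add_self _ _ hs]
  have hmax1 : max nb 0 = nb := by omega
  have hL1 : min (2 * na) (2 * max nb 0 + 1) = min (2 * na) (2 * nb + 1) := by rw [hmax1]
  by_cases hrec : start + s < stop
  · -- recursive case: the tail is again the closed form, two shorter
    have hna2 : -(PySem.Int.floordiv (start + s - stop) s) = na - 1 := by
      rw [hfa]; omega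
    have hnb2 : -(PySem.Int.floordiv (start + s + e - stop) s) = nb - 1 := by
      rw [hfb]; omega
    have hna2ge : 1 ≤ na - 1 := by
      have := (PySem.Int.floordiv_lt_iff_lt_mul (a := start + s - stop) (q := 0) hs).mpr (by omega)
      rw [hfa] at this; omega
    have hmax2 : max (nb - 1) 0 = nb - 1 := by omega
    have hLrel : min (2 * na) (2 * nb + 1)
        = (min (2 * (na - 1)) (2 * (nb - 1) + 1)) + 2 := by omega
    set L2 := min (2 * (na - 1)) (2 * (nb - 1) + 1) with hL2def
    have hL2nonneg : 0 ≤ L2 := by omega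
    simp only [gene_krupa_range_alt, if_neg (by omega : ¬ stop ≤ start),
      if_neg (by omega : ¬ stop ≤ start + s), if_neg hns, ← hsdef, ← hna_def, ← hnb_def,
      hna2, hnb2, hL1, hmax2, hLrel]
    rw [PySem.List.pyRange_one_cons (by omega), PySem.List.pyRange_one_cons (by omega)]
    simp only [List.map_cons]
    norm_num [show PySem.Int.floordiv 0 2 = 0 from rfl, show PySem.Int.mod 0 2 = 0 from rfl,
      show PySem.Int.floordiv 1 2 = 0 from rfl, show PySem.Int.mod 1 2 = 1 from rfl]
    rw [PySem.List.pyRange_one 2, PySem.List.pyRange_one 0]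
    have harg : (L2 + 2 - 2).toNat = (L2 - 0).toNat := by omega
    rw [harg]
    simp only [List.map_map]
    refine List.map_congr_left ?_
    intro k _
    simp only [Function.comp]
    have hfd : (2 + (k : Int)) / 2 = (0 + (k : Int)) / 2 + 1 := by omega
    have hmd : (2 + (k : Int)) % 2 = (0 + (k : Int)) % 2 := by omega
    rw [hfd, hmd]; ring
  · -- the tail is empty: exactly two elements
    have hna_le : na ≤ 1 := by
      have h' : ¬ (start - stop < -1 * s) := by omega
      have : ¬ (PySem.Int.floordiv (start - stop) s < -1) := by
        intro hc
        exact h' ((PySem.Int.floordiv_lt_iff_lt_mul (a := start - stop) (q := -1) hs).mp hc)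
      omega
    have hL : min (2 * na) (2 * nb + 1) = 2 := by omega
    simp only [gene_krupa_range_alt, if_neg (by omega : ¬ stop ≤ start),
      if_pos (by omega : stop ≤ start + s), if_neg hns, ← hsdef, ← hna_def, ← hnb_def, hL1, hL]
    rw [PySem.List.pyRange_one_cons (by omega : (0:Int) < 2),
      PySem.List.pyRange_one_cons (by omega : (0:Int) + 1 < 2),
      PySem.List.pyRange_one_eq_nil (by omega : (2:Int) ≤ 0 + 1 + 1)]
    norm_num [show PySem.Int.floordiv 0 2 = 0 from rfl, show PySem.Int.mod 0 2 = 0 from rfl,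
      show PySem.Int.floordiv 1 2 = 0 from rfl, show PySem.Int.mod 1 2 = 1 from rfl]

-- The pair loop computes the closed form, given ample fuel (positive pair step).
theorem gkrPair_eq_alt (fuel : Nat) : ∀ (latest stop e o : Int), 0 < e + o →
    (stop - latest).toNat + 1 ≤ fuel →
    gkrPair fuel latest stop e o = gene_krupa_range_alt latest stop e o := by
  induction fuel with
  | zero => intro latest stop e o _ hf; omega
  | succ f ih =>
    intro latest stop e o hs hf
    by_cases h1 : latest < stop
    · by_cases h2 : latest + e < stop
      · have hfuel : (stop - (latest + e + o)).toNat + 1 ≤ f := by omega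
        simp only [gkrPair, if_pos h1, if_pos h2]
        rw [ih (latest + e + o) stop e o hs hfuel, alt_step latest stop e o h1 h2 hs]
        norm_num [show latest + (e + o) = latest + e + o by ring]
      · simp only [gkrPair, if_pos h1, if_neg h2]
        rw [alt_single latest stop e o h1 (by omega) hs]
    · simp only [gkrPair, if_neg h1]
      rw [alt_nil latest stop e o (by omega)]

-- ===== VERDICT (by name: the statement is the Claim_ definition above) =====
theorem gene_krupa_range_spec : Claim_equal_gene_krupa_range := by
  intro start stop e o _ hpre
  unfold Spec_gene_krupa_range gene_krupa_range
  rw [show (0 : Int) = 2 * 0 by ring, gkrA_eq_gkrPair ((stop - start).toNat + 2) start stop e o 0]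
  rcases hpre with h | h | h
  · -- empty range: one unfold of each side
    have : ¬ start < stop := by omega
    simp [gkrPair, this, alt_nil start stop e o h]
  · by_cases hs : 0 < e + o
    · exact gkrPair_eq_alt _ start stop e o hs (by omega)
    · -- pair step not positive but second position already past stop
      by_cases h1 : start < stop
      · have h2 : ¬ (start + e < stop) := by omega
        simp only [gkrPair, if_pos h1, if_neg h2]
        simp [gene_krupa_range_alt, show ¬ stop ≤ start by omega, show e + o ≤ 0 by omega]
      · simp [gkrPair, h1, alt_nil start stop e o (by omega)]
  · exact gkrPair_eq_alt _ start stop e o h (by omega)
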